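-- pv_equiv track=rewrite | github.com/halilkirazkaya/netexec-automator | netexec-automator.py | _status_icon
-- ===== SOURCE A (Python) =====
-- RED = "\033[91m"
--
-- GREEN = "\033[92m"
--
-- YELLOW = "\033[93m"
--
-- RESET = "\033[0m"
--
-- ParsedStatus = tuple[str, str]
--
-- def _status_icon(parsed: list[ParsedStatus]) -> str:
--     has_success = any(marker == "[+]" for marker, _ in parsed)
--     has_skip = any(marker == "[!]" for marker, _ in parsed)
--     if has_success:
--         return f"{GREEN}✔{RESET}"
--     if has_skip:
--         return f"{YELLOW}⏱{RESET}"
--     return f"{RED}✘{RESET}"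
-- ===== SOURCE B (Python) =====
-- RED = "\033[91m"
-- GREEN = "\033[92m"
-- YELLOW = "\033[93m"
-- RESET = "\033[0m"
--
-- def _status_icon(parsed):
--     skip = False
--     for marker, _ in parsed:
--         if marker == "[+]":
--             return f"{GREEN}\u2714{RESET}"
--         if marker == "[!]":
--             skip = True
--     return f"{YELLOW}\u23f1{RESET}" if skip else f"{RED}\u2718{RESET}"
-- ===== Notes on version B (the rewrite author's own statement) =====
-- stated objective: alternative
-- what changed: Replaces the two full any-scans over parsed with one early-exiting traversal that returns green on the first '[+]' and maintains a skip flag for '[!]'.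
import Mathlib
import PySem

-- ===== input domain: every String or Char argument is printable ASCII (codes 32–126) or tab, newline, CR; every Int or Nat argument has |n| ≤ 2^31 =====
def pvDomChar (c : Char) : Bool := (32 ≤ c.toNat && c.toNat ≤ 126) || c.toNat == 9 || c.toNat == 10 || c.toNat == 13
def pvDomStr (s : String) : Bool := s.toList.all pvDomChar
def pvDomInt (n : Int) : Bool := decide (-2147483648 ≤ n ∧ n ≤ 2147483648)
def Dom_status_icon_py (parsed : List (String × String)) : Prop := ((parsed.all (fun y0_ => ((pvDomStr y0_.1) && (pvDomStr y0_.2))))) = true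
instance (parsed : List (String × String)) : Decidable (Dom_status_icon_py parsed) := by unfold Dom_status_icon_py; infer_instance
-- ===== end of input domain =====

-- B replaces A's two full any-scans with one early-exiting loop carrying a skip flag; same return value.
-- ===== PORT A =====
def status_icon_py (parsed : List (String × String)) : String :=
  let has_success := parsed.any (fun p => p.1 == "[+]")
  let has_skip := parsed.any (fun p => p.1 == "[!]")
  if has_success then "\x1b[92m\u2714\x1b[0m"
  else if has_skip then "\x1b[93m\u23f1\x1b[0m"
  else "\x1b[91m\u2718\x1b[0m"

-- ===== PORT B =====
def statusIconLoop (parsed : List (String × String)) (skip : Bool) : String :=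
  match parsed with
  | [] => if skip then "\x1b[93m\u23f1\x1b[0m" else "\x1b[91m\u2718\x1b[0m"
  | (marker, _) :: rest =>
    if marker == "[+]" then "\x1b[92m\u2714\x1b[0m"
    else if marker == "[!]" then statusIconLoop rest true
    else statusIconLoop rest skip

def status_icon_py_alt (parsed : List (String × String)) : String :=
  statusIconLoop parsed false

-- ===== PRECONDITION & SPEC =====
def Spec_status_icon_py (parsed : List (String × String)) (out : String) : Prop := out = status_icon_py_alt parsed
instance (parsed : List (String × String)) (out : String) : Decidable (Spec_status_icon_py parsed out) := by unfold Spec_status_icon_py; infer_instance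

-- ===== CLAIM (what is proved, stated in full; the proofs are below) =====
def Claim_equal_status_icon_py : Prop := ∀ (parsed : List (String × String)), Dom_status_icon_py parsed → Spec_status_icon_py parsed (status_icon_py parsed)

-- ===== LEMMAS AND PROOFS =====
theorem statusIconLoop_eq (parsed : List (String × String)) (skip : Bool) :
    statusIconLoop parsed skip =
      (if parsed.any (fun p => p.1 == "[+]") then "\x1b[92m\u2714\x1b[0m"
       else if skip || parsed.any (fun p => p.1 == "[!]") then "\x1b[93m\u23f1\x1b[0m"
       else "\x1b[91m\u2718\x1b[0m") := by
  induction parsed generalizing skip with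
  | nil => simp [statusIconLoop]
  | cons hd tl ih =>
    obtain ⟨m, v⟩ := hd
    simp only [statusIconLoop, List.any_cons]
    by_cases h1 : (m == "[+]") = true
    · simp [h1]
    · have h1' : (m == "[+]") = false := by revert h1; cases (m == "[+]") <;> simp
      by_cases h2 : (m == "[!]") = true
      · rw [ih]
        simp only [h1', h2, Bool.false_or, Bool.true_or, Bool.or_true]
        simp
      · have h2' : (m == "[!]") = false := by revert h2; cases (m == "[!]") <;> simp
        simp only [h1', h2', Bool.false_or]
        simp only [Bool.false_eq_true, if_false]
        exact ih skip

-- ===== VERDICT (by name: the statement is the Claim_ definition above) =====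
theorem status_icon_py_spec : Claim_equal_status_icon_py := by
  intro parsed _
  unfold Spec_status_icon_py status_icon_py status_icon_py_alt
  rw [statusIconLoop_eq]
  simp only [Bool.false_or]
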